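-- pv_equiv track=rewrite | github.com/HeyHO2154/MyVerse | object/star.py | determine_main_sequence_type
-- ===== SOURCE A (Python) =====
-- def determine_main_sequence_type(size):
--     thresholds = [
--         (95, "STAR_MAIN_SEQUENCE_O"),
--         (85, "STAR_MAIN_SEQUENCE_B"),
--         (70, "STAR_MAIN_SEQUENCE_A"),
--         (60, "STAR_MAIN_SEQUENCE_F"),
--         (55, "STAR_MAIN_SEQUENCE_G"),
--         (52, "STAR_MAIN_SEQUENCE_K")
--     ]
--     for threshold, type_id in thresholds:
--         if size >= threshold:
--             return type_id
--     return "STAR_MAIN_SEQUENCE_M"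
-- ===== SOURCE B (Python) =====
-- def determine_main_sequence_type(size):
--     bounds = [52, 55, 60, 70, 85, 95]
--     names = ["STAR_MAIN_SEQUENCE_M", "STAR_MAIN_SEQUENCE_K",
--              "STAR_MAIN_SEQUENCE_G", "STAR_MAIN_SEQUENCE_F",
--              "STAR_MAIN_SEQUENCE_A", "STAR_MAIN_SEQUENCE_B",
--              "STAR_MAIN_SEQUENCE_O"]
--     lo, hi = 0, len(bounds)
--     while lo < hi:
--         mid = (lo + hi) // 2
--         if size >= bounds[mid]:
--             lo = mid + 1
--         else:
--             hi = mid
--     return names[lo]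
-- ===== Notes on version B (the rewrite author's own statement) =====
-- stated objective: alternative
-- what changed: Replaced the descending linear first-match scan over (threshold, name) pairs by a binary search (bisect_right by hand) over an ascending boundary table with a parallel name table.
import Mathlib
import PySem

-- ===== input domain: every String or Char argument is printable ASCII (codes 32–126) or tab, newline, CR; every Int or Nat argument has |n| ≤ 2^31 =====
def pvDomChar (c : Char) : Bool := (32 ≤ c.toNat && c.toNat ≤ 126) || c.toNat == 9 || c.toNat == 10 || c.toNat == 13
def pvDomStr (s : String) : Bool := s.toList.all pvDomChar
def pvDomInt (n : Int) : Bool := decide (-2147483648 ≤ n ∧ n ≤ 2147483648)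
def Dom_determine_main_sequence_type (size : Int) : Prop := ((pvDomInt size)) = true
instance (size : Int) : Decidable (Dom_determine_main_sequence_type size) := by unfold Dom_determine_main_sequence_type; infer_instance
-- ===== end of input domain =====

-- B replaces A's descending linear first-match scan by a binary search over an ascending
-- boundary table with a parallel name table (alternative structure, same exact result).

-- ===== PORT A =====
-- first-match scan over the (threshold, name) pairs; fall-through returns the M type
def pvScanA (size : Int) : List (Int × String) → String
  | [] => "STAR_MAIN_SEQUENCE_M"
  | (t, n) :: rest => if size ≥ t then n else pvScanA size rest

def determine_main_sequence_type (size : Int) : String :=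
  pvScanA size
    [(95, "STAR_MAIN_SEQUENCE_O"),
     (85, "STAR_MAIN_SEQUENCE_B"),
     (70, "STAR_MAIN_SEQUENCE_A"),
     (60, "STAR_MAIN_SEQUENCE_F"),
     (55, "STAR_MAIN_SEQUENCE_G"),
     (52, "STAR_MAIN_SEQUENCE_K")]

-- ===== PORT B =====
-- hand-written bisect_right loop; indices stay in [0, bounds.length], so getD never
-- uses its default (exact w.r.t. Python's bounds[mid] which is always in range here)
def pvBisect (size : Int) (bounds : List Int) (lo hi : Nat) : Nat :=
  if lo < hi then
    let mid := (lo + hi) / 2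
    if size ≥ bounds.getD mid 0 then pvBisect size bounds (mid + 1) hi
    else pvBisect size bounds lo mid
  else lo
termination_by hi - lo
decreasing_by all_goals omega

def determine_main_sequence_type_alt (size : Int) : String :=
  let bounds : List Int := [52, 55, 60, 70, 85, 95]
  let names : List String :=
    ["STAR_MAIN_SEQUENCE_M", "STAR_MAIN_SEQUENCE_K", "STAR_MAIN_SEQUENCE_G",
     "STAR_MAIN_SEQUENCE_F", "STAR_MAIN_SEQUENCE_A", "STAR_MAIN_SEQUENCE_B",
     "STAR_MAIN_SEQUENCE_O"]
  names.getD (pvBisect size bounds 0 bounds.length) ""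

-- ===== PRECONDITION & SPEC =====
def Spec_determine_main_sequence_type (size : Int) (out : String) : Prop := out = determine_main_sequence_type_alt size
instance (size : Int) (out : String) : Decidable (Spec_determine_main_sequence_type size out) := by unfold Spec_determine_main_sequence_type; infer_instance

-- ===== CLAIM (what is proved, stated in full; the proofs are below) =====
def Claim_equal_determine_main_sequence_type : Prop := ∀ (size : Int), Dom_determine_main_sequence_type size → Spec_determine_main_sequence_type size (determine_main_sequence_type size)

-- ===== LEMMAS AND PROOFS =====
theorem pvBisect_step (size : Int) (b : List Int) (lo hi : Nat) (h : lo < hi) :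
    pvBisect size b lo hi =
      if size ≥ b.getD ((lo + hi) / 2) 0 then pvBisect size b ((lo + hi) / 2 + 1) hi
      else pvBisect size b lo ((lo + hi) / 2) := by
  rw [pvBisect]; simp [h]

theorem pvBisect_done (size : Int) (b : List Int) (lo hi : Nat) (h : ¬ lo < hi) :
    pvBisect size b lo hi = lo := by
  rw [pvBisect]; simp [h]

-- ===== VERDICT (by name: the statement is the Claim_ definition above) =====
set_option maxRecDepth 4096 in
theorem determine_main_sequence_type_spec : Claim_equal_determine_main_sequence_type := by
  intro size _
  unfold Spec_determine_main_sequence_type determine_main_sequence_type determine_main_sequence_type_alt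
  by_cases h95 : size ≥ 95 <;> by_cases h85 : size ≥ 85 <;> by_cases h70 : size ≥ 70 <;>
    by_cases h60 : size ≥ 60 <;> by_cases h55 : size ≥ 55 <;> by_cases h52 : size ≥ 52 <;>
    first
      | omega
      | (norm_num [pvScanA, pvBisect_step, pvBisect_done, h95, h85, h70, h60, h55, h52])
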